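-- pv_equiv track=rewrite | github.com/royal-society-of-chemistry/chemlistem | chemlistem/utils.py | bio_to_sobie
-- ===== SOURCE A (Python) =====
-- def bio_to_sobie(seq):
-- 	"""Convert BIO tags to SOBIE tags
--
-- 	Args:
-- 		seq: list of BIO tags
--
-- 	Returns:
-- 		list of SOBIE tags
-- 	"""
--
-- 	outseq = []
-- 	for i in range(len(seq)):
-- 		t = seq[i]
-- 		prev = "O" if i == 0 else seq[i-1]
-- 		next = "O" if i == len(seq)-1 else seq[i+1]
-- 		typ = t[1:]
-- 		ntyp = next[1:]
-- 		ptyp = prev[1:]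
--
-- 		if t.startswith("B"):
-- 			if next == "I%s" % typ:
-- 				outseq.append(t)
-- 			else:
-- 				outseq.append("S%s" % typ)
-- 		elif t.startswith("I"):
-- 			if next == "O" or ntyp != typ or next.startswith("B"):
-- 				outseq.append("E%s" % typ)
-- 			else:
-- 				outseq.append("I%s" % typ)
-- 		else:
-- 			outseq.append("O")
-- 	return outseq
-- ===== SOURCE B (Python) =====
-- def bio_to_sobie(seq):
--     """Convert BIO tags to SOBIE tags by splitting the sequence into maximal
--     linked runs and closing each run's last token."""
--     def links(t, u):
--         # token t continues into u
--         if t.startswith("B"):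
--             return u == "I" + t[1:]
--         if t.startswith("I"):
--             return u != "O" and u[1:] == t[1:] and not u.startswith("B")
--         return False
--
--     def close(t):
--         # label for a token that ends its run
--         if t.startswith("B"):
--             return "S" + t[1:]
--         if t.startswith("I"):
--             return "E" + t[1:]
--         return "O"
--
--     out = []
--     n = len(seq)
--     i = 0
--     while i < n:
--         j = i
--         while j + 1 < n and links(seq[j], seq[j + 1]):
--             j += 1
--         out.extend(seq[i:j])        # every non-final token of a run keeps its tag
--         out.append(close(seq[j]))   # the run's final token is closed
--         i = j + 1
--     return out
-- ===== Notes on version B (the rewrite author's own statement) =====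
-- stated objective: alternative
-- what changed: B splits the sequence into maximal linked runs (next token equal to 'I'+type continues a B-run, and a non-O, non-B token of the same type continues an I-run) and then emits each run's tokens unchanged except its last, which is closed to S/E/O; A instead classifies every index independently with a one-token lookahead.
import Mathlib
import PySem

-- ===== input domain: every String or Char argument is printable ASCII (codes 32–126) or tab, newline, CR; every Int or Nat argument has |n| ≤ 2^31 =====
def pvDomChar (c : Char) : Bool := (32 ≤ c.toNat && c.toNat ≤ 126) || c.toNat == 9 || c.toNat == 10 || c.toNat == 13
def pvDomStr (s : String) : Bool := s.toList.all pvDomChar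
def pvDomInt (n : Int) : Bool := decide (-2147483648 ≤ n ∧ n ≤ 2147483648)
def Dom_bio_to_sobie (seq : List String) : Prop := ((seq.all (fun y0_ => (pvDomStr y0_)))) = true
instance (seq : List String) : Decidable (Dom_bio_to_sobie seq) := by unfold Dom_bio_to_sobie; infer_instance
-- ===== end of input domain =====

-- One honest line: B relabels the sequence run by run (maximal linked chains, only the
-- last token of a chain is rewritten) instead of A's independent per-index lookahead;
-- same asymptotic cost, a genuinely different decomposition.

-- ===== PORT A =====
-- literal transliteration of A's index loop (prev/ptyp are computed and unused, as in A)
def bio_to_sobie (seq : List String) : List String :=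
  (List.range seq.length).foldl (fun outseq i =>
    let t := seq.getD i ""
    let prev := if i = 0 then "O" else seq.getD (i - 1) ""
    let next := if i = seq.length - 1 then "O" else seq.getD (i + 1) ""
    let typ := PySem.Str.slice t (some 1) none
    let ntyp := PySem.Str.slice next (some 1) none
    let _ptyp := PySem.Str.slice prev (some 1) none
    if PySem.Str.startswith t "B" then
      if next = "I" ++ typ then outseq ++ [t] else outseq ++ ["S" ++ typ]
    else if PySem.Str.startswith t "I" then
      if next = "O" ∨ ntyp ≠ typ ∨ PySem.Str.startswith next "B" then outseq ++ ["E" ++ typ]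
      else outseq ++ ["I" ++ typ]
    else outseq ++ ["O"]) []

-- ===== PORT B =====
-- Source B's `links(t, u)`: does token t continue into u?
def pvLinks (t u : String) : Bool :=
  if PySem.Str.startswith t "B" then u == "I" ++ PySem.Str.slice t (some 1) none
  else if PySem.Str.startswith t "I" then
    (u != "O") && (PySem.Str.slice u (some 1) none == PySem.Str.slice t (some 1) none)
      && !(PySem.Str.startswith u "B")
  else false

-- Source B's `close(t)`: the label of a token that ends its run
def pvClose (t : String) : String :=
  if PySem.Str.startswith t "B" then "S" ++ PySem.Str.slice t (some 1) none
  else if PySem.Str.startswith t "I" then "E" ++ PySem.Str.slice t (some 1) none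
  else "O"

-- Source B's inner `while`: extend j while seq[j] links to seq[j+1]
-- (structural recursion on a fuel of seq.length, which the j+1 < len guard never exhausts)
def pvRunEnd (seq : List String) (fuel j : Nat) : Nat :=
  match fuel with
  | 0 => j
  | f + 1 =>
    if j + 1 < seq.length ∧ pvLinks (seq.getD j "") (seq.getD (j + 1) "") = true then
      pvRunEnd seq f (j + 1)
    else j

-- Source B's outer `while`: emit one run at a time (seq[i:j] ported as (drop i).take (j-i),
-- exact for 0 ≤ i ≤ j; fuel seq.length suffices since i strictly increases)
def pvOuter (seq : List String) (fuel i : Nat) : List String :=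
  match fuel with
  | 0 => []
  | f + 1 =>
    if i < seq.length then
      let j := pvRunEnd seq seq.length i
      ((seq.drop i).take (j - i)) ++ [pvClose (seq.getD j "")] ++ pvOuter seq f (j + 1)
    else []

def bio_to_sobie_alt (seq : List String) : List String := pvOuter seq seq.length 0

-- ===== PRECONDITION & SPEC =====
def Spec_bio_to_sobie (seq : List String) (out : List String) : Prop := out = bio_to_sobie_alt seq
instance (seq : List String) (out : List String) : Decidable (Spec_bio_to_sobie seq out) := by unfold Spec_bio_to_sobie; infer_instance

-- ===== CLAIM (what is proved, stated in full; the proofs are below) =====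
def Claim_equal_bio_to_sobie : Prop := ∀ (seq : List String), Dom_bio_to_sobie seq → Spec_bio_to_sobie seq (bio_to_sobie seq)

-- ===== LEMMAS AND PROOFS =====

-- the element A appends at index i, as a function of t = seq[i] and next
def pvStep (t u : String) : String :=
  if PySem.Str.startswith t "B" then
    if u = "I" ++ PySem.Str.slice t (some 1) none then t
    else "S" ++ PySem.Str.slice t (some 1) none
  else if PySem.Str.startswith t "I" then
    if u = "O" ∨ PySem.Str.slice u (some 1) none ≠ PySem.Str.slice t (some 1) none ∨
        PySem.Str.startswith u "B" then "E" ++ PySem.Str.slice t (some 1) none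
    else "I" ++ PySem.Str.slice t (some 1) none
  else "O"

-- A's loop body element, indexed
def pvStepA (seq : List String) (i : Nat) : String :=
  pvStep (seq.getD i "") (if i = seq.length - 1 then "O" else seq.getD (i + 1) "")

-- the common per-index value both programs compute
def pvG (seq : List String) (i : Nat) : String :=
  if i + 1 < seq.length ∧ pvLinks (seq.getD i "") (seq.getD (i + 1) "") = true then
    seq.getD i ""
  else pvClose (seq.getD i "")

-- the whole output from index i on, as a simple one-token recursion
def pvSpecList (seq : List String) (i : Nat) : List String :=
  if i < seq.length then pvG seq i :: pvSpecList seq (i + 1) else []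
termination_by seq.length - i

theorem startswith_I_eq (t : String) (h : PySem.Str.startswith t "I" = true) :
    "I" ++ PySem.Str.slice t (some 1) none = t := by
  apply String.toList_inj.mp
  have h' : "I".toList <+: t.toList := by
    have := PySem.Str.startswith_eq t "I"
    rw [this] at h
    exact (PySem.Chars.startswith_iff _ _).mp h
  simp [PySem.Str.toList_slice, PySem.List.slice_from_one]
  obtain ⟨r, hr⟩ := h'
  simp at hr
  rw [← hr]
  rfl

theorem I_append_ne_O (s : String) : "I" ++ s ≠ "O" := by
  intro h
  have := congrArg String.toList h
  simp at this

theorem pvStep_eq (t u : String) : pvStep t u = if pvLinks t u then t else pvClose t := by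
  unfold pvStep pvLinks pvClose
  by_cases hB : PySem.Str.startswith t "B" = true
  · simp only [hB, if_true]
    by_cases he : u = "I" ++ PySem.Str.slice t (some 1) none
    · simp only [he, beq_self_eq_true, if_true]
    · rw [if_neg he, if_neg (by simpa using he)]
  · simp only [hB, Bool.false_eq_true, if_false]
    by_cases hI : PySem.Str.startswith t "I" = true
    · simp only [hI, if_true]
      by_cases hc : u = "O" ∨ PySem.Str.slice u (some 1) none ≠ PySem.Str.slice t (some 1) none ∨
          PySem.Str.startswith u "B" = true
      · rw [if_pos hc, if_neg]
        simp only [Bool.and_eq_true, bne_iff_ne, beq_iff_eq, Bool.not_eq_true']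
        intro hk
        rcases hc with h1 | h2 | h3
        · exact hk.1.1 h1
        · exact h2 hk.1.2
        · rw [hk.2] at h3; exact Bool.false_ne_true h3
      · rw [if_neg hc, if_pos, startswith_I_eq t hI]
        push Not at hc
        simp only [Bool.and_eq_true, bne_iff_ne, beq_iff_eq, Bool.not_eq_true']
        exact ⟨⟨hc.1, hc.2.1⟩, Bool.not_eq_true _ ▸ hc.2.2⟩
    · simp only [hI, Bool.false_eq_true, if_false]

theorem pvStep_O (t : String) : pvStep t "O" = pvClose t := by
  rw [pvStep_eq]
  have : pvLinks t "O" = false := by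
    unfold pvLinks
    by_cases hB : PySem.Str.startswith t "B" = true
    · rw [if_pos hB]
      simp only [beq_eq_false_iff_ne, ne_eq]
      exact fun h => I_append_ne_O _ h.symm
    · rw [if_neg hB]
      by_cases hI : PySem.Str.startswith t "I" = true
      · rw [if_pos hI]; simp
      · rw [if_neg hI]
  simp [this]

theorem pvStepA_eq_pvG (seq : List String) (i : Nat) (h : i < seq.length) :
    pvStepA seq i = pvG seq i := by
  unfold pvStepA
  by_cases hn : i + 1 < seq.length
  · have hne : i ≠ seq.length - 1 := by omega
    rw [if_neg hne, pvStep_eq]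
    unfold pvG
    by_cases hl : pvLinks (seq.getD i "") (seq.getD (i + 1) "") = true
    · rw [if_pos hl, if_pos ⟨hn, hl⟩]
    · rw [if_neg hl, if_neg (fun hc => hl hc.2)]
  · have hne : i = seq.length - 1 := by omega
    rw [if_pos hne, pvStep_O]
    unfold pvG
    rw [if_neg (fun hc => hn hc.1)]

theorem bio_to_sobie_eq_map (seq : List String) :
    bio_to_sobie seq = (List.range seq.length).map (pvStepA seq) := by
  unfold bio_to_sobie
  rw [PySem.List.foldl_congr_mem (List.range seq.length) _
        (fun outseq i => outseq ++ [pvStepA seq i]) []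
        (by
          intro acc x hx
          dsimp only
          unfold pvStepA pvStep
          split_ifs <;> rfl)]
  rw [PySem.List.foldl_append_singleton_eq_map]
  simp

theorem map_range'_eq_pvSpecList (seq : List String) (i : Nat) :
    (List.range' i (seq.length - i)).map (pvStepA seq) = pvSpecList seq i := by
  by_cases h : i < seq.length
  · have hlen : seq.length - i = (seq.length - (i + 1)) + 1 := by omega
    rw [hlen, List.range'_succ, List.map_cons, map_range'_eq_pvSpecList seq (i + 1)]
    conv_rhs => rw [pvSpecList]
    rw [if_pos h, pvStepA_eq_pvG seq i h]
  · have hlen : seq.length - i = 0 := by omega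
    rw [hlen]
    conv_rhs => rw [pvSpecList]
    rw [if_neg h]
    rfl
termination_by seq.length - i

theorem pvRunEnd_ge (seq : List String) : ∀ (f j : Nat), j ≤ pvRunEnd seq f j := by
  intro f
  induction f with
  | zero => intro j; rfl
  | succ f ih =>
    intro j
    rw [pvRunEnd]
    split
    · exact le_trans (Nat.le_succ j) (ih (j + 1))
    · exact le_refl j

theorem pvRunEnd_stop (seq : List String) (f j : Nat)
    (h : ¬ (j + 1 < seq.length ∧ pvLinks (seq.getD j "") (seq.getD (j + 1) "") = true)) :
    pvRunEnd seq f j = j := by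
  cases f with
  | zero => rfl
  | succ f => rw [pvRunEnd, if_neg h]

theorem pvRunEnd_fuel (seq : List String) :
    ∀ (f g j : Nat), seq.length ≤ f + j → seq.length ≤ g + j →
      pvRunEnd seq f j = pvRunEnd seq g j := by
  intro f
  induction f with
  | zero =>
    intro g j hf hg
    rw [pvRunEnd_stop seq g j (fun hc => by omega)]
    rfl
  | succ f ih =>
    intro g j hf hg
    by_cases hc : j + 1 < seq.length ∧ pvLinks (seq.getD j "") (seq.getD (j + 1) "") = true
    · obtain ⟨g', rfl⟩ : ∃ g', g = g' + 1 := by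
        cases g with
        | zero => exact absurd hc.1 (by omega)
        | succ g' => exact ⟨g', rfl⟩
      rw [pvRunEnd, pvRunEnd, if_pos hc, if_pos hc]
      exact ih g' (j + 1) (by omega) (by omega)
    · rw [pvRunEnd_stop seq _ _ hc, pvRunEnd_stop seq _ _ hc]

theorem pvRunEnd_step (seq : List String) (i : Nat) (h : i < seq.length)
    (hc : i + 1 < seq.length ∧ pvLinks (seq.getD i "") (seq.getD (i + 1) "") = true) :
    pvRunEnd seq seq.length i = pvRunEnd seq seq.length (i + 1) := by
  obtain ⟨f, hf⟩ : ∃ f, seq.length = f + 1 := ⟨seq.length - 1, by omega⟩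
  conv_lhs => rw [hf]
  rw [pvRunEnd, if_pos hc]
  exact pvRunEnd_fuel seq f seq.length (i + 1) (by omega) (by omega)

theorem pvSpecList_run (seq : List String) (i : Nat) (h : i < seq.length) :
    pvSpecList seq i =
      ((seq.drop i).take (pvRunEnd seq seq.length i - i)) ++
        pvClose (seq.getD (pvRunEnd seq seq.length i) "") ::
          pvSpecList seq (pvRunEnd seq seq.length i + 1) := by
  have hstep : pvSpecList seq i = pvG seq i :: pvSpecList seq (i + 1) := by
    conv_lhs => rw [pvSpecList]
    rw [if_pos h]
  by_cases hc : i + 1 < seq.length ∧ pvLinks (seq.getD i "") (seq.getD (i + 1) "") = true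
  · have hre : pvRunEnd seq seq.length i = pvRunEnd seq seq.length (i + 1) :=
      pvRunEnd_step seq i h hc
    have ih := pvSpecList_run seq (i + 1) hc.1
    have hge : i + 1 ≤ pvRunEnd seq seq.length (i + 1) := pvRunEnd_ge seq seq.length (i + 1)
    rw [hre, hstep, ih]
    have hgi : pvG seq i = seq.getD i "" := by unfold pvG; rw [if_pos hc]
    have hget : seq.getD i "" = seq[i] := List.getD_eq_getElem seq "" h
    have hdrop : seq.drop i = seq.getD i "" :: seq.drop (i + 1) := by
      rw [hget, List.getElem_cons_drop h]
    have hsub : pvRunEnd seq seq.length (i + 1) - i =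
        (pvRunEnd seq seq.length (i + 1) - (i + 1)) + 1 := by omega
    rw [hgi, hdrop, hsub, List.take_succ_cons]
    simp
  · have hre : pvRunEnd seq seq.length i = i := pvRunEnd_stop seq seq.length i hc
    have hgi : pvG seq i = pvClose (seq.getD i "") := by unfold pvG; rw [if_neg hc]
    rw [hre, hstep, hgi, Nat.sub_self, List.take_zero, List.nil_append]
termination_by seq.length - i
decreasing_by
  have := pvRunEnd_ge seq seq.length (i + 1); omega

theorem pvOuter_eq_pvSpecList (seq : List String) :
    ∀ (fuel i : Nat), seq.length ≤ fuel + i → pvOuter seq fuel i = pvSpecList seq i := by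
  intro fuel
  induction fuel with
  | zero =>
    intro i hfi
    conv_rhs => rw [pvSpecList]
    rw [if_neg (by omega)]
    rfl
  | succ f ih =>
    intro i hfi
    by_cases hi : i < seq.length
    · rw [pvOuter, if_pos hi]
      show List.take (pvRunEnd seq seq.length i - i) (List.drop i seq) ++
          [pvClose (seq.getD (pvRunEnd seq seq.length i) "")] ++
            pvOuter seq f (pvRunEnd seq seq.length i + 1) =
        pvSpecList seq i
      rw [ih (pvRunEnd seq seq.length i + 1)
            (by have := pvRunEnd_ge seq seq.length i; omega),
          pvSpecList_run seq i hi]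
      simp
    · rw [pvOuter, if_neg hi]
      conv_rhs => rw [pvSpecList]
      rw [if_neg hi]

-- ===== VERDICT (by name: the statement is the Claim_ definition above) =====
theorem bio_to_sobie_spec : Claim_equal_bio_to_sobie := by
  intro seq _
  unfold Spec_bio_to_sobie bio_to_sobie_alt
  rw [bio_to_sobie_eq_map, pvOuter_eq_pvSpecList seq seq.length 0 (by omega), List.range_eq_range']
  have := map_range'_eq_pvSpecList seq 0
  simpa using this
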